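-- pv_equiv track=rewrite | github.com/MelanyAvila/POOyTDA | POO/funciones/metodos.py | recomendar_peliculas
-- ===== SOURCE A (Python) =====
-- def recomendar_peliculas(lista_peli: list) -> str:
--     recomendacion = ''
--     for peliculas in lista_peli:
--         if len(peliculas) == 1:
--             recomendacion += f'se recomienda ver "{peliculas[0]}"\n'
--         else:
--             recomendacion += 'se recomienda ver '
--             for i in range(len(peliculas)):
--                 if i == len(peliculas) - 1:
--                     recomendacion += f'y "{peliculas[i]}"'
--                 else:
--                     recomendacion += f'"{peliculas[i]}", '
--             recomendacion += '\n'
--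
--     resultado_final = ''
--     for i in range(len(recomendacion)):
--         if i == len(recomendacion) - 1 and recomendacion[i] == '\n':
--             break
--         resultado_final += recomendacion[i]
--
--     return resultado_final
-- ===== SOURCE B (Python) =====
-- def recomendar_peliculas(lista_peli: list) -> str:
--     lineas = []
--     for peliculas in lista_peli:
--         if len(peliculas) == 1:
--             lineas.append(f'se recomienda ver "{peliculas[0]}"')
--         elif peliculas:
--             lineas.append('se recomienda ver '
--                           + ''.join(f'"{p}", ' for p in peliculas[:-1])
--                           + f'y "{peliculas[-1]}"')
--         else:
--             lineas.append('se recomienda ver ')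
--     return '\n'.join(lineas)
-- ===== Notes on version B (the rewrite author's own statement) =====
-- stated objective: simpler
-- what changed: B builds one formatted line per sublist (slice + join) and joins the lines with '\n', eliminating A's second character-by-character pass that strips the trailing newline.
import Mathlib
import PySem

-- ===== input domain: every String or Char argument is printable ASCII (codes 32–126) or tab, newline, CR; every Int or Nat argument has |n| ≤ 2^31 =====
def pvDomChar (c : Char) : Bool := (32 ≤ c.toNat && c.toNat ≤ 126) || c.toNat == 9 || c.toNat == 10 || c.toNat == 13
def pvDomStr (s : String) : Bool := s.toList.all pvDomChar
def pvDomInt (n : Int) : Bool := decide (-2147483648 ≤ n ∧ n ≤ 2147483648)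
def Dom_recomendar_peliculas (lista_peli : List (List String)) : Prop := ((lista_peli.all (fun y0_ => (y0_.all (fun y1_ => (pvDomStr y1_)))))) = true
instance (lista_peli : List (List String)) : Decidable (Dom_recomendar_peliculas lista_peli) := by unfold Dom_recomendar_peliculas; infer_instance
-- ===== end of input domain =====

-- B builds one formatted line per sublist and joins them with '\n', removing A's
-- second character-by-character pass that strips the trailing newline (objective: simpler).

-- ===== PORT A =====
-- second pass of A: 'for i in range(len(recomendacion)): if i == len-1 and rec[i] == "\n": break; resultado += rec[i]'
-- modeled exactly: chars are visited in index order, the break stops at the last index when it holds '\n'.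
def pvStripLoop : List Char → Nat → Nat → List Char
  | [], _, _ => []
  | c :: rest, n, i =>
    if i == n - 1 && c == '\n' then []            -- the break
    else c :: pvStripLoop rest n (i + 1)

-- the first loop of A: builds 'recomendacion'
def pvRecomendacion (lista_peli : List (List String)) : String :=
  lista_peli.foldl (fun recomendacion peliculas =>
    if peliculas.length == 1 then
      -- peliculas[0] is in range here (length = 1), so the default is never used
      recomendacion ++ "se recomienda ver \"" ++ PySem.List.pyGetD peliculas 0 "" ++ "\"\n"
    else
      ((PySem.List.pyRange 0 (peliculas.length : Int) 1).foldl (fun r i =>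
          if i == (peliculas.length : Int) - 1 then
            r ++ "y \"" ++ PySem.List.pyGetD peliculas i "" ++ "\""   -- i in range: default unused
          else
            r ++ "\"" ++ PySem.List.pyGetD peliculas i "" ++ "\", ")
        (recomendacion ++ "se recomienda ver ")) ++ "\n") ""

def recomendar_peliculas (lista_peli : List (List String)) : String :=
  String.ofList (pvStripLoop (pvRecomendacion lista_peli).toList
    (pvRecomendacion lista_peli).toList.length 0)

-- ===== PORT B =====
def pvLinea (peliculas : List String) : String :=
  if peliculas.length == 1 then
    "se recomienda ver \"" ++ PySem.List.pyGetD peliculas 0 "" ++ "\""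
  else if !peliculas.isEmpty then
    "se recomienda ver " ++
      PySem.Str.join "" ((PySem.List.slice peliculas none (some (-1))).map
        (fun p => "\"" ++ p ++ "\", ")) ++
      "y \"" ++ PySem.List.pyGetD peliculas (-1) "" ++ "\""            -- peliculas[-1], nonempty here
  else
    "se recomienda ver "

def recomendar_peliculas_alt (lista_peli : List (List String)) : String :=
  PySem.Str.join "\n" (lista_peli.map pvLinea)

-- ===== PRECONDITION & SPEC =====
def Spec_recomendar_peliculas (lista_peli : List (List String)) (out : String) : Prop := out = recomendar_peliculas_alt lista_peli
instance (lista_peli : List (List String)) (out : String) : Decidable (Spec_recomendar_peliculas lista_peli out) := by unfold Spec_recomendar_peliculas; infer_instance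

-- ===== CLAIM (what is proved, stated in full; the proofs are below) =====
def Claim_equal_recomendar_peliculas : Prop := ∀ (lista_peli : List (List String)), Dom_recomendar_peliculas lista_peli → Spec_recomendar_peliculas lista_peli (recomendar_peliculas lista_peli)

-- ===== LEMMAS AND PROOFS =====

-- ''.join on a cons
theorem pv_join_empty_cons (s : String) (L : List String) :
    PySem.Str.join "" (s :: L) = s ++ PySem.Str.join "" L := by
  apply String.toList_inj.mp
  simp only [String.toList_append, PySem.Str.toList_join, List.map_cons]
  cases L <;> simp [PySem.Chars.join, List.intercalate]

-- ''.join over list-append-singleton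
theorem pv_join_empty_concat (L : List String) (s : String) :
    PySem.Str.join "" (L ++ [s]) = PySem.Str.join "" L ++ s := by
  induction L with
  | nil => simp [pv_join_empty_cons]; apply String.toList_inj.mp; simp [PySem.Str.toList_join]
  | cons a L ih => rw [List.cons_append, pv_join_empty_cons, ih, pv_join_empty_cons, String.append_assoc]

theorem pv_join_empty_nil : PySem.Str.join "" ([] : List String) = "" := by
  apply String.toList_inj.mp; simp [PySem.Str.toList_join]

theorem pv_getD_concat (q : List String) (x : String) : (q ++ [x]).getD q.length "" = x := by
  simp [List.getD]

-- the always-else inner fold over a list's indices is a join of wrapped elements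
theorem pv_inner_else (q : List String) (r : String) :
    (List.range q.length).foldl (fun r k => r ++ "\"" ++ q.getD k "" ++ "\", ") r
      = r ++ PySem.Str.join "" (q.map fun s => "\"" ++ s ++ "\", ") := by
  induction q using List.reverseRecOn generalizing r with
  | nil => simp [pv_join_empty_nil]
  | append_singleton q x ih =>
    have hlen : (q ++ [x]).length = q.length + 1 := by simp
    rw [hlen, List.range_succ, List.foldl_append]
    have hcong : (List.range q.length).foldl
        (fun r k => r ++ "\"" ++ (q ++ [x]).getD k "" ++ "\", ") r
        = (List.range q.length).foldl (fun r k => r ++ "\"" ++ q.getD k "" ++ "\", ") r := by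
      apply PySem.List.foldl_congr_mem
      intro acc k hk
      rw [List.mem_range] at hk
      simp [List.getD, List.getElem?_append_left hk]
    rw [hcong, ih]
    simp only [List.foldl_cons, List.foldl_nil, pv_getD_concat, List.map_append,
      List.map_cons, List.map_nil, pv_join_empty_concat]
    simp [String.append_assoc]

-- A's inner loop (the 'else' branch of the outer loop) on a nonempty sublist
theorem pv_inner (p : List String) (hp : p ≠ []) (r : String) :
    (PySem.List.pyRange 0 (p.length : Int) 1).foldl (fun r i =>
        if i == (p.length : Int) - 1 then
          r ++ "y \"" ++ PySem.List.pyGetD p i "" ++ "\""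
        else
          r ++ "\"" ++ PySem.List.pyGetD p i "" ++ "\", ") r
      = r ++ PySem.Str.join "" (p.dropLast.map fun s => "\"" ++ s ++ "\", ")
          ++ "y \"" ++ PySem.List.pyGetD p (-1) "" ++ "\"" := by
  induction p using List.reverseRecOn generalizing r with
  | nil => exact absurd rfl hp
  | append_singleton q x _ =>
    have hlen : ((q ++ [x]).length : Int) = (q.length : Int) + 1 := by simp
    rw [hlen]
    rw [show (q.length : Int) + 1 = ((q.length + 1 : Nat) : Int) by push_cast; ring]
    rw [PySem.List.pyRange_zero_natCast, List.foldl_map, List.range_succ, List.foldl_append]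
    have hcong : (List.range q.length).foldl
        (fun (r : String) (k : Nat) => if ((k : Int)) == ((q.length + 1 : Nat) : Int) - 1 then
            r ++ "y \"" ++ PySem.List.pyGetD (q ++ [x]) (k : Int) "" ++ "\""
          else r ++ "\"" ++ PySem.List.pyGetD (q ++ [x]) (k : Int) "" ++ "\", ") r
        = (List.range q.length).foldl (fun r k => r ++ "\"" ++ q.getD k "" ++ "\", ") r := by
      apply PySem.List.foldl_congr_mem
      intro acc k hk
      rw [List.mem_range] at hk
      have hne : ¬ ((k : Int) == ((q.length + 1 : Nat) : Int) - 1) = true := by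
        simp; omega
      rw [if_neg (by simpa using hne)]
      rw [PySem.List.pyGetD_natCast]
      simp [List.getD, List.getElem?_append_left hk]
    rw [hcong, pv_inner_else]
    have hlast : ((q.length : Int)) == ((q.length + 1 : Nat) : Int) - 1 := by simp
    simp only [List.foldl_cons, List.foldl_nil, hlast, if_pos]
    rw [List.dropLast_concat, PySem.List.pyGetD_neg_one_append_singleton,
      PySem.List.pyGetD_natCast, pv_getD_concat]

-- each outer-loop step of A appends 'pvLinea p ++ "\n"'
theorem pv_step (p : List String) (acc : String) :
    (if p.length == 1 then
      acc ++ "se recomienda ver \"" ++ PySem.List.pyGetD p 0 "" ++ "\"\n"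
    else
      ((PySem.List.pyRange 0 (p.length : Int) 1).foldl (fun r i =>
          if i == (p.length : Int) - 1 then
            r ++ "y \"" ++ PySem.List.pyGetD p i "" ++ "\""
          else
            r ++ "\"" ++ PySem.List.pyGetD p i "" ++ "\", ")
        (acc ++ "se recomienda ver ")) ++ "\n")
      = acc ++ (pvLinea p ++ "\n") := by
  by_cases h1 : p.length == 1
  · rw [if_pos h1]
    unfold pvLinea
    rw [if_pos h1]
    apply String.toList_inj.mp
    simp
  · rw [if_neg h1]
    by_cases hemp : p = []
    · subst hemp
      unfold pvLinea
      simp only [PySem.List.pyRange]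
      norm_num
      apply String.toList_inj.mp
      simp
    · rw [pv_inner p hemp]
      unfold pvLinea
      rw [if_neg h1, if_pos (by simpa using hemp)]
      rw [PySem.List.slice_to_neg_one]
      apply String.toList_inj.mp
      simp
-- A's whole first loop: the buffer is the concatenation of the per-sublist chunks
theorem pv_outer (l : List (List String)) :
    pvRecomendacion l = PySem.Str.join "" (l.map fun p => pvLinea p ++ "\n") := by
  suffices h : ∀ (l : List (List String)) (acc : String),
      l.foldl (fun recomendacion peliculas =>
        if peliculas.length == 1 then
          recomendacion ++ "se recomienda ver \"" ++ PySem.List.pyGetD peliculas 0 "" ++ "\"\n"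
        else
          ((PySem.List.pyRange 0 (peliculas.length : Int) 1).foldl (fun r i =>
              if i == (peliculas.length : Int) - 1 then
                r ++ "y \"" ++ PySem.List.pyGetD peliculas i "" ++ "\""
              else
                r ++ "\"" ++ PySem.List.pyGetD peliculas i "" ++ "\", ")
            (recomendacion ++ "se recomienda ver ")) ++ "\n") acc
      = acc ++ PySem.Str.join "" (l.map fun p => pvLinea p ++ "\n") by
    have := h l ""
    unfold pvRecomendacion
    rw [this]
    apply String.toList_inj.mp
    simp
  intro l acc
  induction l generalizing acc with
  | nil => simp [pv_join_empty_nil]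
  | cons p l ih =>
    rw [List.foldl_cons, List.map_cons, pv_join_empty_cons, pv_step p acc, ih, String.append_assoc]

-- chunks-with-'\n' concatenation vs '\n'.join, for a nonempty list of lines
theorem pv_join_newline (L : List String) (hL : L ≠ []) :
    PySem.Str.join "" (L.map (· ++ "\n")) = PySem.Str.join "\n" L ++ "\n" := by
  induction L with
  | nil => exact absurd rfl hL
  | cons a L ih =>
    cases L with
    | nil =>
      apply String.toList_inj.mp
      simp [PySem.Str.toList_join]
    | cons b L =>
      rw [List.map_cons, pv_join_empty_cons, ih (by simp)]
      apply String.toList_inj.mp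
      simp only [String.toList_append, PySem.Str.toList_join, List.map_cons]
      simp [PySem.Chars.join, List.intercalate]

-- the strip loop drops exactly a final '\n'
theorem pv_strip (cs : List Char) (i : Nat) :
    pvStripLoop cs (i + cs.length) i
      = if cs.getLast? = some '\n' then cs.dropLast else cs := by
  induction cs generalizing i with
  | nil => simp [pvStripLoop]
  | cons c rest ih =>
    cases rest with
    | nil =>
      by_cases hc : c = '\n'
      · subst hc; simp [pvStripLoop]
      · simp [pvStripLoop, hc]
    | cons d rest' =>
      have hcond : (i == i + (c :: d :: rest').length - 1 && c == '\n') = false := by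
        simp only [List.length_cons]; simp
      rw [show pvStripLoop (c :: d :: rest') (i + (c :: d :: rest').length) i
          = if (i == i + (c :: d :: rest').length - 1 && c == '\n') then []
            else c :: pvStripLoop (d :: rest') (i + (c :: d :: rest').length) (i + 1) from rfl,
        hcond]
      simp only [Bool.false_eq_true, if_false]
      have hlen2 : i + (c :: d :: rest').length = (i + 1) + (d :: rest').length := by
        simp only [List.length_cons]; omega
      rw [hlen2, ih (i + 1)]
      rw [List.getLast?_cons_cons]
      by_cases hlast : (d :: rest').getLast? = some '\n'
      · rw [if_pos hlast, if_pos hlast]; rfl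
      · rw [if_neg hlast, if_neg hlast]

-- ===== VERDICT (by name: the statement is the Claim_ definition above) =====
theorem recomendar_peliculas_spec : Claim_equal_recomendar_peliculas := by
  intro l _
  show recomendar_peliculas l = recomendar_peliculas_alt l
  unfold recomendar_peliculas recomendar_peliculas_alt
  rw [pv_outer]
  cases hl : l.map pvLinea with
  | nil =>
    have : l = [] := by cases l <;> simp_all
    subst this
    simp only [List.map_nil, pv_join_empty_nil]
    apply String.toList_inj.mp
    simp [pvStripLoop, PySem.Str.toList_join]
  | cons a L =>
    have hmap : l.map (fun p => pvLinea p ++ "\n") = (l.map pvLinea).map (· ++ "\n") := by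
      simp [Function.comp]
    rw [hmap, hl, pv_join_newline (a :: L) (by simp)]
    have htl : (PySem.Str.join "\n" (a :: L) ++ "\n").toList
        = (PySem.Str.join "\n" (a :: L)).toList ++ ['\n'] := by simp
    rw [htl]
    have h0 : (0 : Nat) + ((PySem.Str.join "\n" (a :: L)).toList ++ ['\n']).length
        = ((PySem.Str.join "\n" (a :: L)).toList ++ ['\n']).length := by omega
    rw [← h0, pv_strip]
    rw [if_pos (by rw [List.getLast?_concat]), List.dropLast_concat, ← hl, String.ofList_toList]
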